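-- pv_equiv track=rewrite | github.com/williamcmoss/DailyProgrammer | 11.12.2019_Easy_Yahtzee.py | yahtzee_upper
-- ===== SOURCE A (Python) =====
-- def yahtzee_upper(roll):
--     nums = {}
--     for num in roll:
--         if num in nums:
--             nums[num]+=num
--         else:
--             nums[num]=num
--     return max(nums.values())
-- ===== SOURCE B (Python) =====
-- def yahtzee_upper(roll):
--     totals = []
--     prev = None
--     for x in sorted(roll):
--         if totals and x == prev:
--             totals[-1] += x
--         else:
--             totals.append(x)
--             prev = x
--     return max(totals)
-- ===== Notes on version B (the rewrite author's own statement) =====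
-- stated objective: alternative
-- what changed: Replaces the dict-accumulation loop (a mutable mapping of running per-face sums, then max over its values) by sorting the roll and scanning consecutive runs of equal faces, keeping one running sum per run.
import Mathlib
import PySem

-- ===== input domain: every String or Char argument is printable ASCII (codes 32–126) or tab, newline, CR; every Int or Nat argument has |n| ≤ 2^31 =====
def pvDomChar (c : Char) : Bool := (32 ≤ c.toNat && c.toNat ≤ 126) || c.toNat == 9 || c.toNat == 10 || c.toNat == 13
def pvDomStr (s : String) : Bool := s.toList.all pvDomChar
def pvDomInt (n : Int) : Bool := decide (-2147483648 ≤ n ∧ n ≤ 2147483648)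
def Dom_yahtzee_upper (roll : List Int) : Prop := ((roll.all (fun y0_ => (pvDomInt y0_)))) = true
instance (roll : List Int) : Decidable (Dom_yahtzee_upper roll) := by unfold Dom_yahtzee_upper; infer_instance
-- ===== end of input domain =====

-- B replaces A's incrementally built dict of running per-key sums by a sort-then-scan over
-- consecutive runs of equal faces (a different decomposition, not claimed faster).
-- ===== PORT A =====
def yahtzee_upper (roll : List Int) : Int :=
  let nums := roll.foldl (fun d num =>
      if d.contains num then d.insert num (d.getD num 0 + num)   -- nums[num] += num
      else d.insert num num)                                     -- nums[num] = num
    PySem.Dict.empty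
  match PySem.List.max? nums.values (fun v => v) with
  | some m => m
  | none => 0   -- unreachable under Pre_: Python's max raises ValueError on an empty dict

-- ===== PORT B =====
def yahtzee_upper_alt (roll : List Int) : Int :=
  -- state: (totals, prev); 'totals[-1] += x' extends the current run, else a new run starts
  let st := (PySem.List.sorted roll (fun x => x) false).foldl
    (fun (st : List Int × Option Int) x =>
      if st.1 ≠ [] ∧ st.2 = some x then
        (PySem.List.pySetD st.1 (-1) (PySem.List.pyGetD st.1 (-1) 0 + x), st.2)
      else (st.1 ++ [x], some x))
    ([], none)
  match PySem.List.max? st.1 (fun v => v) with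
  | some m => m
  | none => 0   -- unreachable under Pre_: Python's max raises ValueError on an empty list

-- ===== PRECONDITION & SPEC =====
-- A (and B) raise ValueError (max of an empty sequence) on the empty roll; excluded.
def Pre_yahtzee_upper (roll : List Int) : Prop := roll ≠ []
instance (roll : List Int) : Decidable (Pre_yahtzee_upper roll) := by unfold Pre_yahtzee_upper; infer_instance
def pvWitness_yahtzee_upper : List Int := [1, 2, 2]

def Spec_yahtzee_upper (roll : List Int) (out : Int) : Prop := out = yahtzee_upper_alt roll
instance (roll : List Int) (out : Int) : Decidable (Spec_yahtzee_upper roll out) := by unfold Spec_yahtzee_upper; infer_instance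

-- ===== CLAIM (what is proved, stated in full; the proofs are below) =====
def Claim_equal_yahtzee_upper : Prop := ∀ (roll : List Int), Dom_yahtzee_upper roll → Pre_yahtzee_upper roll → Spec_yahtzee_upper roll (yahtzee_upper roll)

-- ===== LEMMAS AND PROOFS =====

-- A's two branches are one and the same insert: on a missing key getD gives 0 and 0 + num = num.
theorem yahtzee_step_collapse :
    (fun (d : PySem.Dict Int Int) (num : Int) =>
      if d.contains num then d.insert num (d.getD num 0 + num) else d.insert num num)
    = (fun d num => d.insert num (d.getD num 0 + num)) := by
  funext d num
  by_cases h : d.contains num = true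
  · simp [h]
  · simp only [Bool.not_eq_true] at h
    simp only [h, Bool.false_eq_true, if_false]
    rw [show d.getD num 0 = 0 from PySem.Dict.getD_of_not_contains d 0 h, zero_add]

-- invariant of A's loop: each key holds its running sum, i.e. v * (count so far)
theorem yahtzee_getD_fold (l : List Int) (d : PySem.Dict Int Int) (v : Int) :
    (l.foldl (fun d x => d.insert x (d.getD x 0 + x)) d).getD v 0
      = d.getD v 0 + v * (l.count v : Int) := by
  induction l generalizing d with
  | nil => simp
  | cons x t ih =>
    simp only [List.foldl_cons, ih, PySem.Dict.getD_insert, List.count_cons]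
    by_cases h : v = x
    · subst h; simp; ring
    · have : (x == v) = false := by simp [Ne.symm h]
      simp [h, this]

-- A's dict values, in key-first-occurrence order
theorem yahtzee_values_eq (roll : List Int) :
    (roll.foldl (fun d num => d.insert num (d.getD num 0 + num)) PySem.Dict.empty).values
      = (PySem.Set.ofList roll).map (fun v => v * (roll.count v : Int)) := by
  have hnd : (roll.foldl (fun d num => d.insert num (d.getD num 0 + num)) PySem.Dict.empty).keys.Nodup :=
    PySem.Dict.nodup_keys_foldl_insert roll _ PySem.Dict.empty PySem.Dict.nodup_keys_empty
  have hkeys : (roll.foldl (fun d num => d.insert num (d.getD num 0 + num)) PySem.Dict.empty).keys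
      = PySem.Set.ofList roll := by
    rw [PySem.Dict.keys_foldl_insert]
    simp [PySem.Set.update, PySem.Set.ofList_eq_foldl, PySem.Dict.keys_empty]
  rw [PySem.Dict.values_eq_map_keys _ hnd 0, hkeys]
  refine List.map_congr_left (fun v hv => ?_)
  rw [yahtzee_getD_fold]
  simp

theorem yahtzee_ofList_sublist (s : List Int) : List.Sublist (PySem.Set.ofList s) s := by
  induction s using List.reverseRecOn with
  | nil => simp
  | append_singleton t x ih =>
    rw [PySem.Set.ofList_eq_foldl, List.foldl_append, ← PySem.Set.ofList_eq_foldl]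
    simp only [List.foldl_cons, List.foldl_nil, PySem.Set.add]
    split
    · exact ih.trans (List.sublist_append_left t [x])
    · exact List.Sublist.append ih (List.Sublist.refl [x])

theorem yahtzee_pairwise_le_getLast (s : List Int) (h : s ≠ []) (hp : s.Pairwise (· ≤ ·)) :
    ∀ v ∈ s, v ≤ s.getLast h := by
  intro v hv
  rw [← List.dropLast_append_getLast h] at hv hp
  rw [List.pairwise_append] at hp
  rcases List.mem_append.1 hv with h1 | h1
  · exact hp.2.2 v h1 _ (List.mem_singleton.2 rfl)
  · simp at h1; omega

theorem yahtzee_ofList_append_singleton (s : List Int) (x : Int) :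
    PySem.Set.ofList (s ++ [x]) = if x ∈ s then PySem.Set.ofList s else PySem.Set.ofList s ++ [x] := by
  rw [PySem.Set.ofList_eq_foldl, List.foldl_append, ← PySem.Set.ofList_eq_foldl]
  simp only [List.foldl_cons, List.foldl_nil, PySem.Set.add]
  by_cases h : x ∈ s
  · simp [h, PySem.Set.contains, PySem.Set.mem_ofList]
  · simp [h, PySem.Set.contains, PySem.Set.mem_ofList]

theorem yahtzee_pySetD_append_singleton_neg_one (ys : List Int) (y v : Int) :
    PySem.List.pySetD (ys ++ [y]) (-1) v = ys ++ [v] := by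
  simp [PySem.List.pySetD, PySem.List.pySet?, PySem.List.pyIdx?]

-- invariant of B's run-scan over the sorted roll: totals holds one running sum per distinct
-- face (in order of first occurrence), prev the last face seen
theorem yahtzee_run_fold (s : List Int) (hp : s.Pairwise (· ≤ ·)) :
    s.foldl
      (fun (st : List Int × Option Int) x =>
        if st.1 ≠ [] ∧ st.2 = some x then
          (PySem.List.pySetD st.1 (-1) (PySem.List.pyGetD st.1 (-1) 0 + x), st.2)
        else (st.1 ++ [x], some x))
      ([], none)
    = ((PySem.Set.ofList s).map (fun v => v * (s.count v : Int)), s.getLast?) := by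
  induction s using List.reverseRecOn with
  | nil => simp
  | append_singleton t x ih =>
    rw [List.pairwise_append] at hp
    have hle : ∀ y ∈ t, y ≤ x := fun y hy => hp.2.2 y hy x (List.mem_singleton.2 rfl)
    rw [List.foldl_append, ih hp.1]
    simp only [List.foldl_cons, List.foldl_nil]
    rcases eq_or_ne t [] with rfl | ht
    · simp only [List.nil_append]
      rw [show PySem.Set.ofList [x] = [x] from rfl]
      simp
    · have hlast : t.getLast? = some (t.getLast ht) := List.getLast?_eq_some_getLast ht
      set z := t.getLast ht with hz
      have hKne : (PySem.Set.ofList t) ≠ [] := by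
        have : z ∈ PySem.Set.ofList t := (PySem.Set.mem_ofList _ _).2 (List.getLast_mem ht)
        intro hc; rw [hc] at this; simp at this
      by_cases hxz : x = z
      · -- x continues the last run: the branch 'totals[-1] += x' fires
        have hxmem : x ∈ t := hxz ▸ List.getLast_mem ht
        have hcond : ((PySem.Set.ofList t).map (fun v => v * (t.count v : Int)) ≠ [] ∧
            t.getLast? = some x) := by
          constructor
          · simp [hKne]
          · rw [hlast, hxz]
        rw [if_pos (by simpa using hcond)]
        have hKp : (PySem.Set.ofList t).Pairwise (· ≤ ·) := hp.1.sublist (yahtzee_ofList_sublist t)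
        have hxK : x ∈ PySem.Set.ofList t := (PySem.Set.mem_ofList _ _).2 hxmem
        have hwx : (PySem.Set.ofList t).getLast hKne = x := by
          have h1 : x ≤ (PySem.Set.ofList t).getLast hKne :=
            yahtzee_pairwise_le_getLast _ hKne hKp x hxK
          have h2 : (PySem.Set.ofList t).getLast hKne ≤ x :=
            hle _ ((yahtzee_ofList_sublist t).subset (List.getLast_mem hKne))
          omega
        have hKdec : (PySem.Set.ofList t).dropLast ++ [x] = PySem.Set.ofList t := by
          rw [← hwx]; exact List.dropLast_append_getLast hKne
        have hxdrop : x ∉ (PySem.Set.ofList t).dropLast := by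
          have hnd : (PySem.Set.ofList t).Nodup := PySem.Set.nodup_ofList t
          rw [← hKdec, List.nodup_append] at hnd
          intro hc
          exact hnd.2.2 x hc x (List.mem_singleton.2 rfl) rfl
        rw [yahtzee_ofList_append_singleton, if_pos hxmem, ← hKdec]
        simp only [List.map_append, List.map_cons, List.map_nil,
          PySem.List.pyGetD_neg_one_append_singleton, yahtzee_pySetD_append_singleton_neg_one]
        simp only [Prod.mk.injEq]
        refine ⟨?_, ?_⟩
        · congr 1
          · apply List.map_congr_left
            intro v hv
            have hvx : v ≠ x := fun hc => hxdrop (hc ▸ hv)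
            simp [List.count_append, Ne.symm hvx]
          · simp [List.count_append]
            ring
        · rw [hlast, ← hxz, List.getLast?_concat]
      · -- x starts a new run: the branch 'totals.append(x)' fires, and x ∉ t
        have hxnot : x ∉ t := by
          intro hc
          have h1 : x ≤ z := yahtzee_pairwise_le_getLast t ht hp.1 x hc
          have h2 : z ≤ x := hle z (List.getLast_mem ht)
          omega
        have hcond : ¬ ((PySem.Set.ofList t).map (fun v => v * (t.count v : Int)) ≠ [] ∧
            t.getLast? = some x) := by
          rintro ⟨-, hc⟩
          rw [hlast] at hc
          exact hxz (Option.some_injective _ hc).symm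
        rw [if_neg (by simpa using hcond)]
        rw [yahtzee_ofList_append_singleton, if_neg hxnot]
        simp only [List.map_append, List.map_cons, List.map_nil, List.getLast?_concat]
        simp only [Prod.mk.injEq]
        refine ⟨?_, ?_⟩
        · congr 1
          · apply List.map_congr_left
            intro v hv
            have hvt : v ∈ t := (yahtzee_ofList_sublist t).subset hv
            have hvx : v ≠ x := fun hc => hxnot (hc ▸ hvt)
            simp [List.count_append, Ne.symm hvx]
          · simp [List.count_append, List.count_eq_zero.2 hxnot]
        · trivial

-- max over Int lists is permutation-invariant (the value, not the position)
theorem yahtzee_max?_id_eq_of_perm (l1 l2 : List Int) (h : l1.Perm l2) :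
    PySem.List.max? l1 (fun v => v) = PySem.List.max? l2 (fun v => v) := by
  cases hm1 : PySem.List.max? l1 (fun v => v) with
  | none =>
    rw [PySem.List.max?_eq_none_iff] at hm1
    subst hm1
    rw [eq_comm, PySem.List.max?_eq_none_iff]
    exact h.nil_eq.symm
  | some m1 =>
    cases hm2 : PySem.List.max? l2 (fun v => v) with
    | none =>
      rw [PySem.List.max?_eq_none_iff] at hm2
      subst hm2
      rw [show l1 = [] from h.symm.nil_eq.symm] at hm1
      simp [PySem.List.max?] at hm1
    | some m2 =>
      have q1 := PySem.List.max?_mem hm1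
      have q2 := PySem.List.max?_mem hm2
      have r1 := PySem.List.max?_isMax hm1 m2 (h.symm.mem_iff.1 q2)
      have r2 := PySem.List.max?_isMax hm2 m1 (h.mem_iff.1 q1)
      simp at r1 r2 ⊢
      omega

-- the two value lists are permutations of one another
theorem yahtzee_lists_perm (roll : List Int) :
    ((PySem.Set.ofList roll).map (fun v => v * (roll.count v : Int))).Perm
      ((PySem.Set.ofList (PySem.List.sorted roll (fun x => x) false)).map
        (fun v => v * ((PySem.List.sorted roll (fun x => x) false).count v : Int))) := by
  have hperm : (PySem.List.sorted roll (fun x => x) false).Perm roll := PySem.List.sorted_perm _ _ _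
  have hsets : (PySem.Set.ofList roll).Perm (PySem.Set.ofList (PySem.List.sorted roll (fun x => x) false)) := by
    refine (List.perm_ext_iff_of_nodup (PySem.Set.nodup_ofList _) (PySem.Set.nodup_ofList _)).2 ?_
    intro a
    rw [PySem.Set.mem_ofList, PySem.Set.mem_ofList]
    exact (hperm.mem_iff).symm
  have hmap : ((PySem.Set.ofList (PySem.List.sorted roll (fun x => x) false)).map
        (fun v => v * ((PySem.List.sorted roll (fun x => x) false).count v : Int)))
      = ((PySem.Set.ofList (PySem.List.sorted roll (fun x => x) false)).map
        (fun v => v * (roll.count v : Int))) := by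
    refine List.map_congr_left (fun v _ => ?_)
    rw [hperm.count_eq]
  rw [hmap]
  exact hsets.map _

-- ===== VERDICT (by name: the statement is the Claim_ definition above) =====
theorem yahtzee_upper_spec : Claim_equal_yahtzee_upper := by
  intro roll _ _
  show yahtzee_upper roll = yahtzee_upper_alt roll
  unfold yahtzee_upper yahtzee_upper_alt
  simp only [yahtzee_step_collapse]
  rw [show (List.foldl (fun d num => d.insert num (d.getD num 0 + num)) PySem.Dict.empty roll) =
      roll.foldl (fun d num => d.insert num (d.getD num 0 + num)) PySem.Dict.empty from rfl,
    yahtzee_values_eq,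
    yahtzee_run_fold _ (PySem.List.sorted_pairwise roll (fun x => x)),
    yahtzee_max?_id_eq_of_perm _ _ (yahtzee_lists_perm roll)]
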